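-- pv_equiv track=rewrite | github.com/Yingdi2021/BA_Arbeit_Probing | simplified_d_classes.py | findAllCombinations
-- ===== SOURCE A (Python) =====
-- def findAllCombinations(n1, n2, k):
--     n = n1+n2
--     result = list()
--     for test1 in range(n1+1):
--         for test2 in range(n2+1):
--             if test1+test2 == k:
--                 # one combination found! We will test test1 class1 items and test2 class2 items
--                 subset_list = []
--                 for i in range(test1):
--                     subset_list.append(i)
--                 for j in range(n1, n1+test2):
--                     subset_list.append(j)
--                 subset = tuple(subset_list)
--                 result.append(subset)
--     return result
-- ===== SOURCE B (Python) =====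
-- def findAllCombinations(n1, n2, k):
--     # For each feasible test1, test2 is forced to k - test1; no inner scan.
--     lo = max(0, k - n2)
--     hi = min(n1, k)
--     return [tuple(list(range(test1)) + list(range(n1, n1 + (k - test1))))
--             for test1 in range(lo, hi + 1)]
-- ===== Notes on version B (the rewrite author's own statement) =====
-- stated objective: alternative
-- what changed: B removes the inner test2 scan: for each test1 the unique test2 = k - test1 is range-checked arithmetically, so B iterates once over the feasible test1 interval and builds each subset from two ranges directly; runtime is dominated by the output size, so this was not measurably faster.
import Mathlib
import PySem

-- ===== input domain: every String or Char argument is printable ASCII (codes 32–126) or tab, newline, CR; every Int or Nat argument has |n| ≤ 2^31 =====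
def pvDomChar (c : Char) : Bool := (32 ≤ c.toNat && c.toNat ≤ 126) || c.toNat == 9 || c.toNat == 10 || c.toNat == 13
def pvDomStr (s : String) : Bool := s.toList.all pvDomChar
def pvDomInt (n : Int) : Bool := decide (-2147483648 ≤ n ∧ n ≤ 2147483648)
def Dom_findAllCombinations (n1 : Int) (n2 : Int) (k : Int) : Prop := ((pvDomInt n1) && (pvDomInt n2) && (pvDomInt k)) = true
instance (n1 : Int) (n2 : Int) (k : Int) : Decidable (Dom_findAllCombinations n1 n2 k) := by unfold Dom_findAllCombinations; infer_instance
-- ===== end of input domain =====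

-- B replaces A's nested test1×test2 scan by a single pass over the feasible
-- test1 interval (test2 = k - test1 is forced), building each subset from two
-- ranges directly; same return value (runtime is dominated by the output).

-- ===== PORT A =====
def findAllCombinations (n1 : Int) (n2 : Int) (k : Int) : List (List Int) :=
  (PySem.List.pyRange 0 (n1 + 1) 1).foldl (fun result test1 =>
    (PySem.List.pyRange 0 (n2 + 1) 1).foldl (fun result test2 =>
      if test1 + test2 = k then
        result ++ [((PySem.List.pyRange n1 (n1 + test2) 1).foldl (fun s j => s ++ [j])
                     ((PySem.List.pyRange 0 test1 1).foldl (fun s i => s ++ [i]) []))]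
      else result) result) []

-- ===== PORT B =====
def findAllCombinations_alt (n1 : Int) (n2 : Int) (k : Int) : List (List Int) :=
  (PySem.List.pyRange (max 0 (k - n2)) (min n1 k + 1) 1).map
    (fun test1 => PySem.List.pyRange 0 test1 1 ++ PySem.List.pyRange n1 (n1 + (k - test1)) 1)

-- ===== PRECONDITION & SPEC =====
def Spec_findAllCombinations (n1 : Int) (n2 : Int) (k : Int) (out : List (List Int)) : Prop := out = findAllCombinations_alt n1 n2 k
instance (n1 : Int) (n2 : Int) (k : Int) (out : List (List Int)) : Decidable (Spec_findAllCombinations n1 n2 k out) := by unfold Spec_findAllCombinations; infer_instance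

-- ===== CLAIM (what is proved, stated in full; the proofs are below) =====
def Claim_equal_findAllCombinations : Prop := ∀ (n1 : Int) (n2 : Int) (k : Int), Dom_findAllCombinations n1 n2 k → Spec_findAllCombinations n1 n2 k (findAllCombinations n1 n2 k)

-- ===== LEMMAS AND PROOFS =====

-- the append-one-by-one builder fold is just list append
lemma pvFoldlApp (xs : List Int) : ∀ acc : List Int, xs.foldl (fun s v => s ++ [v]) acc = acc ++ xs := by
  induction xs with
  | nil => intro acc; simp
  | cons x xs ih => intro acc; simp [List.foldl, ih]

-- A's inner loop over test2 appends exactly the subset for test2 = k - t1, when in range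
lemma pvInner (k t1 : Int) (g : Int → List (List Int) → List (List Int)) (b : Int) :
    ∀ (n : Nat) (a : Int) (acc : List (List Int)), (b - a).toNat = n →
      (PySem.List.pyRange a b 1).foldl (fun r t2 => if t1 + t2 = k then g t2 r else r) acc
        = if a ≤ k - t1 ∧ k - t1 < b then g (k - t1) acc else acc := by
  intro n
  induction n with
  | zero =>
    intro a acc h
    rw [PySem.List.pyRange_one_eq_nil (by omega)]
    simp only [List.foldl_nil]
    rw [if_neg (by omega)]
  | succ n ih =>
    intro a acc h
    rw [PySem.List.pyRange_one_cons (by omega)]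
    simp only [List.foldl_cons]
    by_cases hc : t1 + a = k
    · rw [if_pos hc, ih (a + 1) (g a acc) (by omega), if_neg (by omega),
        if_pos (by omega), show k - t1 = a by omega]
    · rw [if_neg hc, ih (a + 1) acc (by omega)]
      by_cases h2 : a + 1 ≤ k - t1 ∧ k - t1 < b
      · rw [if_pos h2, if_pos (by omega)]
      · rw [if_neg h2, if_neg (by omega)]

-- A's outer loop, whose step appends [f x] exactly when c ≤ x ≤ d, is B's map over the clipped interval
lemma pvOuter (c d : Int) (f : Int → List Int) (F : List (List Int) → Int → List (List Int)) (b : Int)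
    (hF : ∀ (r : List (List Int)) (x : Int), F r x = if c ≤ x ∧ x ≤ d then r ++ [f x] else r) :
    ∀ (n : Nat) (a : Int) (acc : List (List Int)), (b - a).toNat = n →
      (PySem.List.pyRange a b 1).foldl F acc
        = acc ++ (PySem.List.pyRange (max a c) (min b (d + 1)) 1).map f := by
  intro n
  induction n with
  | zero =>
    intro a acc h
    rw [PySem.List.pyRange_one_eq_nil (b := b) (by omega),
      PySem.List.pyRange_one_eq_nil (by omega)]
    simp
  | succ n ih =>
    intro a acc h
    rw [PySem.List.pyRange_one_cons (by omega)]
    simp only [List.foldl_cons]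
    rw [hF]
    by_cases hc : c ≤ a ∧ a ≤ d
    · rw [if_pos hc, ih (a + 1) _ (by omega),
        show max a c = a by omega, show max (a + 1) c = a + 1 by omega,
        PySem.List.pyRange_one_cons (a := a) (by omega)]
      simp
    · rw [if_neg hc, ih (a + 1) acc (by omega)]
      by_cases h2 : a < c
      · rw [show max a c = c by omega, show max (a + 1) c = c by omega]
      · rw [PySem.List.pyRange_one_eq_nil (by omega),
          PySem.List.pyRange_one_eq_nil (by omega)]

lemma pvMain (n1 n2 k : Int) : findAllCombinations n1 n2 k = findAllCombinations_alt n1 n2 k := by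
  unfold findAllCombinations findAllCombinations_alt
  have hF : ∀ (r : List (List Int)) (t1 : Int),
      (PySem.List.pyRange 0 (n2 + 1) 1).foldl (fun result test2 =>
        if t1 + test2 = k then
          result ++ [((PySem.List.pyRange n1 (n1 + test2) 1).foldl (fun s j => s ++ [j])
                       ((PySem.List.pyRange 0 t1 1).foldl (fun s i => s ++ [i]) []))]
        else result) r
      = if k - n2 ≤ t1 ∧ t1 ≤ k then
          r ++ [PySem.List.pyRange 0 t1 1 ++ PySem.List.pyRange n1 (n1 + (k - t1)) 1]
        else r := by
    intro r t1
    rw [pvInner k t1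
      (fun t2 acc => acc ++ [((PySem.List.pyRange n1 (n1 + t2) 1).foldl (fun s j => s ++ [j])
                              ((PySem.List.pyRange 0 t1 1).foldl (fun s i => s ++ [i]) []))])
      (n2 + 1) (n2 + 1 - 0).toNat 0 r rfl]
    by_cases hc : k - n2 ≤ t1 ∧ t1 ≤ k
    · rw [if_pos (by omega), if_pos hc, pvFoldlApp, pvFoldlApp]
      simp
    · rw [if_neg (by omega), if_neg hc]
  rw [pvOuter (k - n2) k
    (fun t1 => PySem.List.pyRange 0 t1 1 ++ PySem.List.pyRange n1 (n1 + (k - t1)) 1)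
    _ (n1 + 1) (fun r t1 => hF r t1) (n1 + 1 - 0).toNat 0 [] rfl]
  rw [show min (n1 + 1) (k + 1) = min n1 k + 1 by omega]
  simp

-- ===== VERDICT (by name: the statement is the Claim_ definition above) =====
theorem findAllCombinations_spec : Claim_equal_findAllCombinations := by
  intro n1 n2 k _
  exact pvMain n1 n2 k
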